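-- pv_equiv track=rewrite | github.com/deeaion/ubb_cs | Year_1/Semester_1/Fundamentele_Programarii/Labs/Lab 7/diclab7/infrastucura/repository_client.py | return_index_client
-- ===== SOURCE A (Python) =====
-- def return_index_client(clients,id_client):
--     found = -1
--     for client in range(0, len(clients)):
--         if (clients[client]['id'] == id_client):
--             found = client
--     if (found == -1):
--         raise ValueError("client does not exist\n")
--     return found
-- ===== SOURCE B (Python) =====
-- def return_index_client(clients, id_client):
--     for i in range(len(clients) - 1, -1, -1):
--         if clients[i]['id'] == id_client:
--             return i
--     raise ValueError("client does not exist\n")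
-- ===== Notes on version B (the rewrite author's own statement) =====
-- stated objective: simpler
-- what changed: B iterates the clients backwards and returns on the first match (which is A's last match), eliminating A's 'found' sentinel and the unconditional full-length scan; the no-match ValueError is identical.
import Mathlib
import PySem

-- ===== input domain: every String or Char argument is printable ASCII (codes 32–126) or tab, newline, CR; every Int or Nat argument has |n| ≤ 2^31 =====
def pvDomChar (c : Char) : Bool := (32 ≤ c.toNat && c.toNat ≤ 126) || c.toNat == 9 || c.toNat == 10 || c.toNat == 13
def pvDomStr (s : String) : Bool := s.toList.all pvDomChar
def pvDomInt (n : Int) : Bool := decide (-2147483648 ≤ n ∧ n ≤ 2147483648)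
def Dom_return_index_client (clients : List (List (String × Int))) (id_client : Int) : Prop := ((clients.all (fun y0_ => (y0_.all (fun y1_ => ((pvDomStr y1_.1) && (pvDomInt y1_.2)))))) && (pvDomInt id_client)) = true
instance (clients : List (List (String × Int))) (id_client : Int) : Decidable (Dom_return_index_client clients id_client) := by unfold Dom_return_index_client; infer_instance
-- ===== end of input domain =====

-- B iterates the clients backwards and returns the index of the first match it sees (A's last
-- match), dropping A's 'found' sentinel and the unconditional full scan; objective: simpler.
-- The dict lookup clients[i]['id'] is modelled by PySem.Dict.ofList + get?.

-- ===== PORT A =====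
-- forward loop: 'found' starts at -1, every matching index overwrites it; counter tracks the index
def return_index_client (clients : List (List (String × Int))) (id_client : Int) : Int :=
  (clients.foldl
    (fun (st : Int × Int) c =>
      ((if (PySem.Dict.ofList c).get? "id" = some id_client then st.2 else st.1), st.2 + 1))
    (-1, 0)).1

-- ===== PORT B =====
-- scan the (index, client) pairs from the back; first hit is returned. The Python 'raise' branch
-- (no match at all) is outside Pre_; the exhausted scan is represented by -1 there.
def riAltAux (xs : List (Int × List (String × Int))) (id_client : Int) : Int :=
  match xs with
  | [] => -1
  | (i, c) :: rest =>
      if (PySem.Dict.ofList c).get? "id" = some id_client then i else riAltAux rest id_client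

def return_index_client_alt (clients : List (List (String × Int))) (id_client : Int) : Int :=
  riAltAux ((clients.zipIdx.map (fun p => ((p.2 : Int), p.1))).reverse) id_client

-- ===== PRECONDITION & SPEC =====
-- Pre_ = exactly the inputs on which the Python A returns: every client dict has the key 'id'
-- (else A's loop raises KeyError) and some client matches (else A raises ValueError).
def Pre_return_index_client (clients : List (List (String × Int))) (id_client : Int) : Prop :=
  (∀ c ∈ clients, ((PySem.Dict.ofList c).get? "id").isSome) ∧
  (∃ c ∈ clients, (PySem.Dict.ofList c).get? "id" = some id_client)
instance (clients : List (List (String × Int))) (id_client : Int) : Decidable (Pre_return_index_client clients id_client) := by unfold Pre_return_index_client; infer_instance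

def pvWitness_return_index_client : (List (List (String × Int))) × Int :=
  ([[("id", 3)], [("id", 7)], [("id", 3)]], 3)

def Spec_return_index_client (clients : List (List (String × Int))) (id_client : Int) (out : Int) : Prop := out = return_index_client_alt clients id_client
instance (clients : List (List (String × Int))) (id_client : Int) (out : Int) : Decidable (Spec_return_index_client clients id_client out) := by unfold Spec_return_index_client; infer_instance

-- ===== CLAIM (what is proved, stated in full; the proofs are below) =====
def Claim_equal_return_index_client : Prop := ∀ (clients : List (List (String × Int))) (id_client : Int), Dom_return_index_client clients id_client → Pre_return_index_client clients id_client → Spec_return_index_client clients id_client (return_index_client clients id_client)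

-- ===== LEMMAS AND PROOFS =====

-- backward scan with an explicit fallback, used only in the proofs
def riScan (xs : List (Int × List (String × Int))) (id_client : Int) (fb : Int) : Int :=
  match xs with
  | [] => fb
  | (i, c) :: rest =>
      if (PySem.Dict.ofList c).get? "id" = some id_client then i else riScan rest id_client fb

theorem riScan_eq_aux (xs : List (Int × List (String × Int))) (id_client : Int) :
    riScan xs id_client (-1) = riAltAux xs id_client := by
  induction xs with
  | nil => rfl
  | cons p rest ih => cases p; simp [riScan, riAltAux, ih]

theorem riScan_append_singleton (xs : List (Int × List (String × Int))) (id_client : Int)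
    (i : Int) (c : List (String × Int)) (fb : Int) :
    riScan (xs ++ [(i, c)]) id_client fb
      = riScan xs id_client (if (PySem.Dict.ofList c).get? "id" = some id_client then i else fb) := by
  induction xs with
  | nil => simp [riScan]
  | cons p rest ih => cases p; simp [riScan, ih]

-- the forward fold from any start state equals the backward scan of the enumerated list
theorem fold_eq_scan (clients : List (List (String × Int))) (id_client : Int)
    (fb n : Int) :
    (clients.foldl
      (fun (st : Int × Int) c =>
        ((if (PySem.Dict.ofList c).get? "id" = some id_client then st.2 else st.1), st.2 + 1))
      (fb, n)).1
    = riScan ((clients.zipIdx.map (fun p => ((p.2 : Int) + n, p.1))).reverse) id_client fb := by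
  induction clients generalizing fb n with
  | nil => simp [riScan]
  | cons c rest ih =>
      simp only [List.foldl_cons, List.zipIdx_cons, List.map_cons, List.reverse_cons]
      rw [riScan_append_singleton]
      rw [ih]
      congr 2
      · simp only [List.zipIdx_succ, List.map_map]
        congr 1
        funext p
        simp
        ring
      · simp

theorem return_index_client_spec : Claim_equal_return_index_client := by
  intro clients id_client _ _
  unfold Spec_return_index_client return_index_client return_index_client_alt
  rw [fold_eq_scan clients id_client (-1) 0, riScan_eq_aux]
  norm_num
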